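-- pv_equiv track=rewrite | github.com/vpakspace/universal-agent-connector | src/disambiguation/jaguar_resolver.py | _generate_unique_uri
-- ===== SOURCE A (Python) =====
-- from typing import Dict, List, Optional, Set, Tuple
--
-- def _generate_unique_uri(
--
--     entity_name: str,
--     entity_type: str,
--     existing_uris: Set[str]
-- ) -> str:
--     """
--     Generate unique URI for entity.
--
--     Format: entity://{type}/{normalized_name}_{suffix}
--
--     Args:
--         entity_name: Name of the entity
--         entity_type: Type of the entity
--         existing_uris: Set of existing URIs to avoid collisions
--
--     Returns:
--         Unique URI string
--     """
--     # Normalize entity name for URI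
--     normalized_name = entity_name.lower().replace(" ", "_").replace("-", "_")
--     normalized_name = "".join(c for c in normalized_name if c.isalnum() or c == "_")
--
--     base_uri = f"entity://{entity_type.lower()}/{normalized_name}"
--
--     # If base URI exists, add suffix
--     if base_uri in existing_uris:
--         suffix = 1
--         while f"{base_uri}_{suffix}" in existing_uris:
--             suffix += 1
--         return f"{base_uri}_{suffix}"
--
--     return base_uri
-- ===== SOURCE B (Python) =====
-- def _generate_unique_uri(entity_name, entity_type, existing_uris):
--     normalized_name = entity_name.lower().replace(" ", "_").replace("-", "_")
--     normalized_name = "".join(c for c in normalized_name if c.isalnum() or c == "_")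
--     base_uri = f"entity://{entity_type.lower()}/{normalized_name}"
--     if base_uri not in existing_uris:
--         return base_uri
--     # Build a suffix index once: the tails of all existing URIs under this base.
--     prefix = base_uri + "_"
--     tails = {uri[len(prefix):] for uri in existing_uris if uri.startswith(prefix)}
--     suffix = 1
--     while str(suffix) in tails:
--         suffix += 1
--     return prefix + str(suffix)
-- ===== Notes on version B (the rewrite author's own statement) =====
-- stated objective: alternative
-- what changed: B builds a suffix index in one pass (the set of tails of existing URIs that start with base_uri+'_') and then probes bare decimal suffix strings against that index, instead of A's loop that rebuilds full candidate URIs and re-queries the full URI set on every probe.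
import Mathlib
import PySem

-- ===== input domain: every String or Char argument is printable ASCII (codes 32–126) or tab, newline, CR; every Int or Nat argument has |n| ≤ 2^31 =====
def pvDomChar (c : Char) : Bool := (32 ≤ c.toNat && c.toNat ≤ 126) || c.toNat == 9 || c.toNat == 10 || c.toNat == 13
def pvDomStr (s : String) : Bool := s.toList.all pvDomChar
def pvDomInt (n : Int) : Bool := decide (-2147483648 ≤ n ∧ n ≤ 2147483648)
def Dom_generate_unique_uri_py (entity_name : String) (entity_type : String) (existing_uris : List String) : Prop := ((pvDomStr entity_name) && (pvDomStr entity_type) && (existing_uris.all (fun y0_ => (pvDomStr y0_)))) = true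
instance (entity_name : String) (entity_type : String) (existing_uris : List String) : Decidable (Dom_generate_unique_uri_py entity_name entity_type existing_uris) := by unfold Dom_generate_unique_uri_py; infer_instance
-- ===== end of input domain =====

-- B replaces A's rebuild-candidate-and-query-full-set probe loop by a one-pass suffix
-- index (set of tails under base_uri+"_") probed with bare decimal strings (objective: alternative).

-- Shared normalization (both Pythons contain the identical normalization lines).
def pvNormalize (entity_name : String) : String :=
  String.ofList (((PySem.Str.replace (PySem.Str.replace (PySem.Str.lower entity_name) " " "_") "-" "_").toList).filter
    (fun c => PySem.Chars.isalnum c || c == '_'))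

-- ===== PORT A =====
-- A's inner `while f"{base_uri}_{suffix}" in existing_uris: suffix += 1`.
-- The fuel is only a totality guard (existing_uris.length + 1 distinct candidates
-- cannot all be members); the fuel-0 branch is never reached on real runs.
def pvALoop (base : String) (ex : List String) (suffix : Nat) : Nat → String
  | 0 => base ++ "_" ++ PySem.Int.toStr suffix
  | fuel + 1 =>
    if ex.contains (base ++ "_" ++ PySem.Int.toStr suffix) then
      pvALoop base ex (suffix + 1) fuel
    else
      base ++ "_" ++ PySem.Int.toStr suffix

def generate_unique_uri_py (entity_name : String) (entity_type : String) (existing_uris : List String) : String :=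
  let base_uri : String := "entity://" ++ PySem.Str.lower entity_type ++ "/" ++ pvNormalize entity_name
  if existing_uris.contains base_uri then
    pvALoop base_uri existing_uris 1 (existing_uris.length + 1)
  else
    base_uri

-- ===== PORT B =====
-- B's `while str(suffix) in tails: suffix += 1` over the precomputed tail set.
-- Fuel is again only a totality guard (never exhausted on real runs).
def pvBLoop (pfx : String) (tails : PySem.Set String) (suffix : Nat) : Nat → String
  | 0 => pfx ++ PySem.Int.toStr suffix
  | fuel + 1 =>
    if tails.contains (PySem.Int.toStr suffix) then
      pvBLoop pfx tails (suffix + 1) fuel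
    else
      pfx ++ PySem.Int.toStr suffix

def generate_unique_uri_py_alt (entity_name : String) (entity_type : String) (existing_uris : List String) : String :=
  let base_uri : String := "entity://" ++ PySem.Str.lower entity_type ++ "/" ++ pvNormalize entity_name
  if !(existing_uris.contains base_uri) then
    base_uri
  else
    let pfx := base_uri ++ "_"
    let tails : PySem.Set String :=
      PySem.Set.ofList ((existing_uris.filter (fun u => PySem.Str.startswith u pfx)).map
        (fun u => PySem.Str.slice u (some ((pfx.toList.length : Int))) none))
    pvBLoop pfx tails 1 (existing_uris.length + 1)

-- ===== PRECONDITION & SPEC =====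
def Spec_generate_unique_uri_py (entity_name : String) (entity_type : String) (existing_uris : List String) (out : String) : Prop := out = generate_unique_uri_py_alt entity_name entity_type existing_uris
instance (entity_name : String) (entity_type : String) (existing_uris : List String) (out : String) : Decidable (Spec_generate_unique_uri_py entity_name entity_type existing_uris out) := by unfold Spec_generate_unique_uri_py; infer_instance

-- ===== CLAIM =====
def Claim_equal_generate_unique_uri_py : Prop := ∀ (entity_name : String) (entity_type : String) (existing_uris : List String), Dom_generate_unique_uri_py entity_name entity_type existing_uris → Spec_generate_unique_uri_py entity_name entity_type existing_uris (generate_unique_uri_py entity_name entity_type existing_uris)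

-- ===== LEMMAS AND PROOFS =====
-- The suffix index answers exactly the query A's probe makes on the full set:
-- a tail t is in the index iff pfx ++ t is an existing URI.
theorem pvTails_contains (ex : List String) (pfx t : String) :
    (PySem.Set.ofList ((ex.filter (fun u => PySem.Str.startswith u pfx)).map
      (fun u => PySem.Str.slice u (some ((pfx.toList.length : Int))) none))).contains t
    = ex.contains (pfx ++ t) := by
  rw [Bool.eq_iff_iff]
  simp only [PySem.Set.contains, List.contains_eq_mem, decide_eq_true_eq,
    PySem.Set.mem_ofList, List.mem_map, List.mem_filter,
    PySem.Str.startswith_eq, PySem.Chars.startswith_iff]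
  constructor
  · rintro ⟨u, ⟨hu, ⟨rest, hrest⟩⟩, hslice⟩
    have : u = pfx ++ t := by
      apply String.ext
      have h1 : (PySem.Str.slice u (some ((pfx.toList.length : Int))) none).toList = u.toList.drop pfx.toList.length := by
        simp [PySem.Str.toList_slice, PySem.Chars.slice_eq_listSlice, PySem.List.slice_from_natCast]
      simp only [String.toList_append]
      rw [← hrest, List.drop_left] at h1
      rw [← hrest, ← h1, hslice]
    exact this ▸ hu
  · intro h
    refine ⟨pfx ++ t, ⟨h, ⟨t.toList, by simp⟩⟩, ?_⟩
    apply String.ext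
    simp [PySem.Str.toList_slice, PySem.Chars.slice_eq_listSlice, PySem.List.slice_from_natCast]

-- With pointwise-equal probe predicates and equal fuel, the two loops coincide.
theorem pvBLoop_eq_pvALoop (base : String) (ex : List String) (tails : PySem.Set String)
    (h : ∀ t, tails.contains t = ex.contains (base ++ "_" ++ t)) :
    ∀ (fuel suffix : Nat), pvBLoop (base ++ "_") tails suffix fuel = pvALoop base ex suffix fuel := by
  intro fuel
  induction fuel with
  | zero => intro s; simp [pvBLoop, pvALoop]
  | succ f ih => intro s; unfold pvBLoop pvALoop; rw [h, ih]

-- ===== VERDICT =====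
theorem generate_unique_uri_py_spec : Claim_equal_generate_unique_uri_py := by
  intro entity_name entity_type existing_uris _
  unfold Spec_generate_unique_uri_py generate_unique_uri_py generate_unique_uri_py_alt
  generalize ("entity://" ++ PySem.Str.lower entity_type ++ "/" ++ pvNormalize entity_name) = base
  by_cases hmem : existing_uris.contains base = true
  · rw [if_pos hmem, if_neg (by simpa using hmem)]
    exact (pvBLoop_eq_pvALoop base existing_uris _
      (fun t => pvTails_contains existing_uris (base ++ "_") t) _ 1).symm
  · rw [if_neg hmem, if_pos (by simpa using hmem)]
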